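-- pv_equiv track=rewrite | github.com/huangruizhe/icefall | egs/librispeech/ASR/conformer_ctc2_noseg/alignment.py | remove_outliers
-- ===== SOURCE A (Python) =====
-- def remove_outliers(my_list, max_symbol_id, scan_range=100, outlier_threshold=60):
--     # Given a list of integers in my_list in ascending order, remove outliers
--     # such that there is a gap more than outlier_threshold
--
--     while my_list[0] == max_symbol_id:
--         my_list = my_list[1:]
--     while my_list[-1] == max_symbol_id:
--         my_list = my_list[:-1]
--
--     if len(my_list) <= 10:
--         return my_list
--
--     scan_range = min(scan_range, int(len(my_list)/2) - 1)
--     left = [i+1 for i in range(0, scan_range) if my_list[i+1] - my_list[i] > outlier_threshold]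
--     right = [i-1 for i in range(-scan_range, 0) if my_list[i] - my_list[i-1] > outlier_threshold]
--     left = left[-1] if len(left) > 0 else 0
--     right = right[0]+1 if len(right) > 0 else None
--
--     return my_list[left: right]
-- ===== SOURCE B (Python) =====
-- def remove_outliers(my_list, max_symbol_id, scan_range=100, outlier_threshold=60):
--     # Single linear scan for the trim boundaries (one slice instead of repeated
--     # slicing), then direct index scans for the cut points instead of building
--     # intermediate lists.
--     lo = 0
--     while my_list[lo] == max_symbol_id:
--         lo += 1
--     hi = len(my_list) - 1
--     while my_list[hi] == max_symbol_id:
--         hi -= 1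
--     core = my_list[lo:hi + 1]
--
--     n = len(core)
--     if n <= 10:
--         return core
--
--     scan = min(scan_range, n // 2 - 1)
--     left = 0
--     for i in range(1, scan + 1):
--         if core[i] - core[i - 1] > outlier_threshold:
--             left = i
--     right = n
--     for i in range(n - scan, n):
--         if core[i] - core[i - 1] > outlier_threshold:
--             right = i
--             break
--     return core[left:right]
-- ===== Notes on version B (the rewrite author's own statement) =====
-- stated objective: alternative
-- what changed: B finds the trim boundaries with a single index scan and one slice instead of A's repeated one-element slicing, and finds the cut points by direct scans (running last match / first match with break) instead of building two comprehension lists and indexing them.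
import Mathlib
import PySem

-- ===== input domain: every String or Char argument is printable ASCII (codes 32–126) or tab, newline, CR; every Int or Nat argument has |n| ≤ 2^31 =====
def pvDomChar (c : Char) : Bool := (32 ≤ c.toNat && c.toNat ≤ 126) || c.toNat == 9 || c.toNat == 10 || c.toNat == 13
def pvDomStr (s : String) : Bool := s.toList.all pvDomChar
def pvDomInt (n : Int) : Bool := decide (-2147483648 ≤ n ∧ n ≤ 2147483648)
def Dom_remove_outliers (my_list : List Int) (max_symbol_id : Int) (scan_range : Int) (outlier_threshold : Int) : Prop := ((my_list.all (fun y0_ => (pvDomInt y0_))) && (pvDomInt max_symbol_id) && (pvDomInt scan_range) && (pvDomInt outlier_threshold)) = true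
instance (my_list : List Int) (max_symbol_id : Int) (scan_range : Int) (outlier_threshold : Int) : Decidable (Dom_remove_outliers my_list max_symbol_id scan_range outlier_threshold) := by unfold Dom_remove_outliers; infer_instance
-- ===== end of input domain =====

-- B replaces A's repeated one-element slicing while trimming by a single boundary
-- scan plus one slice, and A's two comprehension-built lists by direct index scans
-- that keep only the cut point (last match / first match).

-- ===== PORT A =====

-- 'while my_list[0] == max_symbol_id: my_list = my_list[1:]'
def pvTrimFrontA (m : Int) : List Int → List Int
  | [] => []                                  -- Python raises IndexError here; excluded by Pre_
  | x :: xs => if x = m then pvTrimFrontA m xs else x :: xs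

-- 'while my_list[-1] == max_symbol_id: my_list = my_list[:-1]'
def pvTrimBackA (m : Int) (l : List Int) : List Int :=
  match h : PySem.List.pyGet? l (-1) with
  | none => l                                 -- Python raises IndexError here; excluded by Pre_
  | some x =>
      if x = m then pvTrimBackA m (PySem.List.slice l none (some (-1))) else l
  termination_by l.length
  decreasing_by
    have hx := PySem.List.mem_of_pyGet?_eq_some _ h
    have hne : l ≠ [] := by intro hnil; subst hnil; simp at hx
    have hpos := List.length_pos_of_ne_nil hne
    simp [PySem.List.slice_to_neg_one]
    omega

def remove_outliers (my_list : List Int) (max_symbol_id : Int) (scan_range : Int) (outlier_threshold : Int) : List Int :=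
  let l1 := pvTrimFrontA max_symbol_id my_list
  let l2 := pvTrimBackA max_symbol_id l1
  if (l2.length : Int) ≤ 10 then l2 else
  let n : Int := l2.length
  let scan := min scan_range (PySem.Int.floordiv n 2 - 1)
  let leftL := ((PySem.List.pyRange 0 scan 1).filter
      (fun i => decide (PySem.List.pyGetD l2 (i+1) 0 - PySem.List.pyGetD l2 i 0 > outlier_threshold))).map (fun i => i + 1)
  let rightL := ((PySem.List.pyRange (-scan) 0 1).filter
      (fun i => decide (PySem.List.pyGetD l2 i 0 - PySem.List.pyGetD l2 (i-1) 0 > outlier_threshold))).map (fun i => i - 1)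
  let left : Int := match leftL.getLast? with
    | some v => v
    | none => 0
  let right? : Option Int := match rightL.head? with
    | some v => some (v + 1)
    | none => none
  PySem.List.slice l2 (some left) right?

-- ===== PORT B =====

-- the 'while my_list[lo] == max_symbol_id: lo += 1' counter (count of the leading run);
-- B's backward 'hi' scan is the same counter run over the reversed list
def pvLeadB (m : Int) : List Int → Nat
  | [] => 0                                   -- Python raises IndexError here; excluded by Pre_
  | x :: xs => if x = m then pvLeadB m xs + 1 else 0

-- 'for i in …: if core[i] - core[i-1] > t: right = i; break'
def pvFindGapB (core : List Int) (t : Int) : List Int → Option Int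
  | [] => none
  | i :: rest =>
      if PySem.List.pyGetD core i 0 - PySem.List.pyGetD core (i-1) 0 > t then some i
      else pvFindGapB core t rest

def remove_outliers_alt (my_list : List Int) (max_symbol_id : Int) (scan_range : Int) (outlier_threshold : Int) : List Int :=
  let lo : Int := pvLeadB max_symbol_id my_list
  let hi : Int := (my_list.length : Int) - 1 - (pvLeadB max_symbol_id my_list.reverse)
  let core := PySem.List.slice my_list (some lo) (some (hi + 1))
  let n : Int := core.length
  if n ≤ 10 then core else
  let scan := min scan_range (PySem.Int.floordiv n 2 - 1)
  let left : Int := (PySem.List.pyRange 1 (scan+1) 1).foldl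
      (fun acc i => if PySem.List.pyGetD core i 0 - PySem.List.pyGetD core (i-1) 0 > outlier_threshold then i else acc) 0
  let right : Int := (pvFindGapB core outlier_threshold (PySem.List.pyRange (n - scan) n 1)).getD n
  PySem.List.slice core (some left) (some right)

-- ===== PRECONDITION & SPEC =====
-- A raises IndexError exactly when every element equals max_symbol_id (the trim loops
-- empty the list and index it); Pre_ excludes exactly those inputs.
def Pre_remove_outliers (my_list : List Int) (max_symbol_id : Int) (scan_range : Int) (outlier_threshold : Int) : Prop :=
  ∃ x ∈ my_list, x ≠ max_symbol_id
instance (my_list : List Int) (max_symbol_id : Int) (scan_range : Int) (outlier_threshold : Int) : Decidable (Pre_remove_outliers my_list max_symbol_id scan_range outlier_threshold) := by unfold Pre_remove_outliers; infer_instance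

def pvWitness_remove_outliers : List Int × Int × Int × Int := ([1, 2, 90], 0, 100, 60)

def Spec_remove_outliers (my_list : List Int) (max_symbol_id : Int) (scan_range : Int) (outlier_threshold : Int) (out : List Int) : Prop := out = remove_outliers_alt my_list max_symbol_id scan_range outlier_threshold
instance (my_list : List Int) (max_symbol_id : Int) (scan_range : Int) (outlier_threshold : Int) (out : List Int) : Decidable (Spec_remove_outliers my_list max_symbol_id scan_range outlier_threshold out) := by unfold Spec_remove_outliers; infer_instance

-- ===== CLAIM (what is proved, stated in full; the proofs are below) =====
def Claim_equal_remove_outliers : Prop := ∀ (my_list : List Int) (max_symbol_id : Int) (scan_range : Int) (outlier_threshold : Int), Dom_remove_outliers my_list max_symbol_id scan_range outlier_threshold → Pre_remove_outliers my_list max_symbol_id scan_range outlier_threshold → Spec_remove_outliers my_list max_symbol_id scan_range outlier_threshold (remove_outliers my_list max_symbol_id scan_range outlier_threshold)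

-- ===== LEMMAS AND PROOFS =====

theorem pvTrimFrontA_eq_dropWhile (m : Int) (l : List Int) :
    pvTrimFrontA m l = l.dropWhile (fun x => x == m) := by
  induction l with
  | nil => rfl
  | cons x xs ih =>
      by_cases h : x = m <;> simp [pvTrimFrontA, h, ih]

theorem pvTrimBackA_eq (m : Int) (l : List Int) :
    pvTrimBackA m l = (l.reverse.dropWhile (fun x => x == m)).reverse := by
  induction l using List.reverseRecOn with
  | nil => unfold pvTrimBackA; rfl
  | append_singleton xs x ih =>
      have hget := PySem.List.pyGet?_neg_one_append_singleton xs x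
      unfold pvTrimBackA
      split
      · next hnone => rw [hget] at hnone; cases hnone
      · next y hsome =>
          rw [hget] at hsome
          injection hsome with hxy; subst hxy
          by_cases h : x = m
          · simp [h, PySem.List.slice_to_neg_one, ih]
          · simp [h]

theorem pvLeadB_eq_takeWhile (m : Int) (l : List Int) :
    (pvLeadB m l : Nat) = (l.takeWhile (fun x => x == m)).length := by
  induction l with
  | nil => rfl
  | cons x xs ih =>
      by_cases h : x = m <;> simp [pvLeadB, h, ih]

theorem pvFindGapB_eq (core : List Int) (t : Int) (R : List Int) :
    pvFindGapB core t R =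
      (R.filter (fun i => decide (PySem.List.pyGetD core i 0 - PySem.List.pyGetD core (i-1) 0 > t))).head? := by
  induction R with
  | nil => rfl
  | cons i rest ih =>
      by_cases h : PySem.List.pyGetD core i 0 - PySem.List.pyGetD core (i-1) 0 > t <;>
        simp [pvFindGapB, h, ih]

theorem pvFoldLast (R : List Int) (q : Int → Prop) [DecidablePred q] (a : Int) :
    R.foldl (fun acc i => if q i then i else acc) a = ((R.filter (fun i => decide (q i))).getLast?).getD a := by
  induction R generalizing a with
  | nil => rfl
  | cons i rest ih =>
      by_cases h : q i <;> simp [h, ih, List.getLast?_cons]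

-- the trimmed list both programs go on with, under Pre_
theorem pvDropWhile_eq_drop (p : Int → Bool) (l : List Int) :
    l.dropWhile p = l.drop (l.takeWhile p).length := by
  have h := List.drop_left (l₁ := l.takeWhile p) (l₂ := l.dropWhile p)
  rw [List.takeWhile_append_dropWhile] at h
  exact h.symm

theorem pvCore_eq (m : Int) (l : List Int) (hpre : ∃ x ∈ l, x ≠ m) :
    pvTrimBackA m (pvTrimFrontA m l) =
      PySem.List.slice l (some ((pvLeadB m l : Nat) : Int))
        (some (((l.length : Int) - 1 - ((pvLeadB m l.reverse : Nat) : Int)) + 1)) := by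
  obtain ⟨x, hxl, hxm⟩ := hpre
  rw [pvTrimFrontA_eq_dropWhile, pvTrimBackA_eq, pvLeadB_eq_takeWhile, pvLeadB_eq_takeWhile]
  set p : Int → Bool := fun y => y == m with hp
  set T := l.takeWhile p with hT
  set D := l.dropWhile p with hD
  have hTD : T ++ D = l := List.takeWhile_append_dropWhile
  have hxD : x ∈ D := by
    have hx' := hxl
    rw [← hTD] at hx'
    rcases List.mem_append.1 hx' with h | h
    · exact absurd (List.mem_takeWhile_imp h) (by simp [hp, hxm])
    · exact h
  have hrev : l.reverse = D.reverse ++ T.reverse := by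
    rw [← hTD, List.reverse_append]
  have hnotall : (D.reverse.takeWhile p).length ≠ D.reverse.length := by
    intro hlen
    have heq := (List.takeWhile_prefix (l := D.reverse) p).eq_of_length hlen
    have hall : p x = true :=
      List.mem_takeWhile_imp (heq ▸ List.mem_reverse.2 hxD)
    simp [hp, hxm] at hall
  have htw : l.reverse.takeWhile p = D.reverse.takeWhile p := by
    rw [hrev, List.takeWhile_append, if_neg hnotall]
  have htb_le : (D.reverse.takeWhile p).length ≤ D.length := by
    have := (List.takeWhile_sublist (l := D.reverse) p).length_le
    simpa using this
  have htb_lt : (D.reverse.takeWhile p).length < D.length := by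
    rcases lt_or_eq_of_le htb_le with h | h
    · exact h
    · exact absurd (by simpa using h) hnotall
  have hlenl : T.length + D.length = l.length := by
    rw [← hTD]; simp
  rw [htw]
  have h0 : (0 : Int) ≤ ((T.length : Nat) : Int) := by positivity
  have h1 : (0 : Int) ≤ ((l.length : Int) - 1 - ((D.reverse.takeWhile p).length : Int)) + 1 := by
    omega
  rw [PySem.List.slice_toNat l h0 h1]
  have hdrop : l.drop ((T.length : Int)).toNat = D := by
    rw [Int.toNat_natCast, ← hTD]; exact List.drop_left
  rw [hdrop]
  rw [pvDropWhile_eq_drop, List.reverse_drop, List.reverse_reverse]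
  congr 1
  simp only [List.length_reverse]
  omega

-- index shift: a negative Python index equals the same index plus the length
theorem pvShiftIdx (c : List Int) (j : Int) (h1 : -(c.length : Int) ≤ j) (h2 : j < 0) :
    PySem.List.pyGetD c (j + (c.length : Int)) 0 = PySem.List.pyGetD c j 0 := by
  obtain ⟨k, hk⟩ : ∃ k : Nat, j = -(k : Int) := ⟨(-j).toNat, by omega⟩
  subst hk
  rw [PySem.List.pyGetD_neg_natCast c k 0 (by omega) (by omega)]
  rw [PySem.List.pyGetD_eq_getElem c 0 (by omega) (by omega)]
  congr 1
  omega

-- A's left comprehension+last equals B's running-last fold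
theorem pvLeft_eq (c : List Int) (scan t : Int) :
    (PySem.List.pyRange 1 (scan + 1) 1).foldl
        (fun acc i => if PySem.List.pyGetD c i 0 - PySem.List.pyGetD c (i-1) 0 > t then i else acc) 0
      = (((PySem.List.pyRange 0 scan 1).filter
          (fun i => decide (PySem.List.pyGetD c (i+1) 0 - PySem.List.pyGetD c i 0 > t))).map
            (fun i => i + 1)).getLast?.getD 0 := by
  rw [pvFoldLast (q := fun i => PySem.List.pyGetD c i 0 - PySem.List.pyGetD c (i-1) 0 > t)]
  suffices h : (PySem.List.pyRange 1 (scan + 1) 1).filter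
        (fun i => decide (PySem.List.pyGetD c i 0 - PySem.List.pyGetD c (i-1) 0 > t))
      = ((PySem.List.pyRange 0 scan 1).filter
          (fun i => decide (PySem.List.pyGetD c (i+1) 0 - PySem.List.pyGetD c i 0 > t))).map
            (fun i => i + 1) by rw [h]
  rw [PySem.List.pyRange_one 1 (scan + 1), PySem.List.pyRange_one 0 scan,
    List.filter_map, List.filter_map, List.map_map]
  have hn : (scan + 1 - 1).toNat = (scan - 0).toNat := by omega
  rw [hn]
  have hfun : (fun k : Nat => (1 : Int) + k)
      = ((fun i : Int => i + 1) ∘ fun k : Nat => (0 : Int) + k) := by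
    funext k; simp [Function.comp]; ring
  rw [hfun]
  congr 1
  apply List.filter_congr
  intro k _
  simp only [Function.comp]
  rw [decide_eq_decide, show (0 : Int) + (k : Int) + 1 - 1 = (0 : Int) + k from by ring]

-- a slice to the very end equals a slice to the length
theorem pvSliceFull (c : List Int) (a : Int) (ha : 0 ≤ a) :
    PySem.List.slice c (some a) none = PySem.List.slice c (some a) (some (c.length : Int)) := by
  rw [PySem.List.slice_from c ha,
    PySem.List.slice_toNat c (b := ((c.length : Nat) : Int)) ha (by positivity)]
  refine (List.take_of_length_le ?_).symm
  simp

-- a negative stop index equals the same stop shifted by the length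
theorem pvSliceShift (c : List Int) (a b : Int) (hb1 : -(c.length : Int) ≤ b) (hb2 : b < 0) :
    PySem.List.slice c (some a) (some b) = PySem.List.slice c (some a) (some (b + c.length)) := by
  have hcl : PySem.List.clampIdx c.length b = PySem.List.clampIdx c.length (b + c.length) := by
    unfold PySem.List.clampIdx
    split_ifs <;> omega
  simp only [PySem.List.slice, hcl]

-- A's right comprehension+first (with its negative indices) gives the same slice as
-- B's first-gap scan over positive indices
theorem pvRight_eq (c : List Int) (scan t left : Int) (hscan : scan < (c.length : Int))
    (hleft : 0 ≤ left) :
    PySem.List.slice c (some left)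
        (match (((PySem.List.pyRange (-scan) 0 1).filter
            (fun i => decide (PySem.List.pyGetD c i 0 - PySem.List.pyGetD c (i-1) 0 > t))).map
              (fun i => i - 1)).head? with
          | some v => some (v + 1)
          | none => none)
      = PySem.List.slice c (some left)
          (some ((pvFindGapB c t
              (PySem.List.pyRange ((c.length : Int) - scan) (c.length : Int) 1)).getD
                (c.length : Int))) := by
  rw [pvFindGapB_eq]
  have hshift : PySem.List.pyRange ((c.length : Int) - scan) (c.length : Int) 1
      = (PySem.List.pyRange (-scan) 0 1).map (fun i => i + (c.length : Int)) := by
    rw [PySem.List.pyRange_one ((c.length : Int) - scan), PySem.List.pyRange_one (-scan),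
      List.map_map]
    have hn : ((c.length : Int) - ((c.length : Int) - scan)).toNat = ((0 : Int) - -scan).toNat := by
      omega
    rw [hn]
    have hfun : (fun k : Nat => (c.length : Int) - scan + k)
        = ((fun i : Int => i + (c.length : Int)) ∘ fun k : Nat => -scan + k) := by
      funext k; simp [Function.comp]; ring
    rw [hfun]
  rw [hshift, List.filter_map]
  have hpred : (PySem.List.pyRange (-scan) 0 1).filter
        ((fun i => decide (PySem.List.pyGetD c i 0 - PySem.List.pyGetD c (i-1) 0 > t))
          ∘ fun i => i + (c.length : Int))
      = (PySem.List.pyRange (-scan) 0 1).filter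
          (fun i => decide (PySem.List.pyGetD c i 0 - PySem.List.pyGetD c (i-1) 0 > t)) := by
    apply List.filter_congr
    intro i hi
    have hb := (PySem.List.mem_pyRange_one).1 hi
    simp only [Function.comp]
    rw [show i + (c.length : Int) - 1 = (i - 1) + (c.length : Int) from by ring,
      pvShiftIdx c i (by omega) (by omega), pvShiftIdx c (i - 1) (by omega) (by omega)]
  rw [hpred, List.head?_map, List.head?_map]
  cases hF : ((PySem.List.pyRange (-scan) 0 1).filter
      (fun i => decide (PySem.List.pyGetD c i 0 - PySem.List.pyGetD c (i-1) 0 > t))).head? with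
  | none =>
      simp only [Option.map_none, Option.getD_none]
      exact pvSliceFull c left hleft
  | some v =>
      have hv : v ∈ PySem.List.pyRange (-scan) 0 1 :=
        (List.mem_filter.1 (List.mem_of_mem_head? hF)).1
      have hb := (PySem.List.mem_pyRange_one).1 hv
      simp only [Option.map_some, Option.getD_some]
      rw [show v - 1 + 1 = v from by ring]
      exact pvSliceShift c left v (by omega) (by omega)

set_option maxHeartbeats 1000000 in
theorem remove_outliers_spec : Claim_equal_remove_outliers := by
  intro l m sr t _dom hpre
  unfold Spec_remove_outliers
  unfold remove_outliers remove_outliers_alt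
  simp only []
  rw [← pvCore_eq m l hpre]
  set c := pvTrimBackA m (pvTrimFrontA m l) with hc
  by_cases h10 : ((c.length : Nat) : Int) ≤ 10
  · simp [h10]
  · simp only [if_neg h10]
    set scan := min sr (PySem.Int.floordiv (c.length : Int) 2 - 1) with hscan
    have hn : (10 : Int) < (c.length : Int) := by omega
    have hslt : scan < (c.length : Int) := by
      have h2 := PySem.Int.floordiv_eq_ediv_of_pos (a := ((c.length : Nat) : Int)) (b := 2) (by norm_num)
      rw [hscan]
      have : PySem.Int.floordiv (c.length : Int) 2 - 1 < (c.length : Int) := by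
        rw [h2]; omega
      omega
    have hleftm : (match (((PySem.List.pyRange 0 scan 1).filter
          (fun i => decide (PySem.List.pyGetD c (i+1) 0 - PySem.List.pyGetD c i 0 > t))).map
            (fun i => i + 1)).getLast? with
          | some v => v
          | none => (0 : Int))
        = (((PySem.List.pyRange 0 scan 1).filter
          (fun i => decide (PySem.List.pyGetD c (i+1) 0 - PySem.List.pyGetD c i 0 > t))).map
            (fun i => i + 1)).getLast?.getD 0 := by
      cases (((PySem.List.pyRange 0 scan 1).filter
          (fun i => decide (PySem.List.pyGetD c (i+1) 0 - PySem.List.pyGetD c i 0 > t))).map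
            (fun i => i + 1)).getLast? <;> rfl
    have hleft0 : (0 : Int) ≤ (((PySem.List.pyRange 0 scan 1).filter
          (fun i => decide (PySem.List.pyGetD c (i+1) 0 - PySem.List.pyGetD c i 0 > t))).map
            (fun i => i + 1)).getLast?.getD 0 := by
      cases hL : (((PySem.List.pyRange 0 scan 1).filter
          (fun i => decide (PySem.List.pyGetD c (i+1) 0 - PySem.List.pyGetD c i 0 > t))).map
            (fun i => i + 1)).getLast? with
      | none => simp
      | some v =>
          have hvmem : v ∈ (((PySem.List.pyRange 0 scan 1).filter
              (fun i => decide (PySem.List.pyGetD c (i+1) 0 - PySem.List.pyGetD c i 0 > t))).map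
                (fun i => i + 1)) := List.mem_of_getLast? hL
          obtain ⟨i, hi, rfl⟩ := List.mem_map.1 hvmem
          have := (PySem.List.mem_pyRange_one).1 (List.mem_filter.1 hi).1
          simp only [Option.getD_some]
          omega
    rw [hleftm, pvLeft_eq]
    exact pvRight_eq c scan t _ hslt hleft0
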